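-- pv_equiv track=rewrite | github.com/AlexisBal/specialized-nmt-framework | tuner/training_utils.py | preserve_chinese_punctuation
-- ===== SOURCE A (Python) =====
-- def preserve_chinese_punctuation(text):
--     """
--     Préserve explicitement la ponctuation chinoise traditionnelle
--     en gérant correctement les guillemets ouvrants et fermants.
--     """
--     # Mapping simple ponctuation
--     simple_map = {
--         ',': '，',  # Virgule
--         '.': '。',  # Point
--         '?': '？',  # Point d'interrogation
--         '!': '！',  # Point d'exclamation
--         ':': '：',  # Deux-points
--         ';': '；',  # Point-virgule
--         ' ': '',    # Supprime les espaces
--     }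
--
--     result = text
--
--     # Appliquer mappings simples
--     for western, chinese in simple_map.items():
--         result = result.replace(western, chinese)
--
--     # Gérer les guillemets avec booléens
--     in_double_quote = False
--     in_single_quote = False
--     chars = list(result)
--
--     for i, char in enumerate(chars):
--         if char == '"':
--             if not in_double_quote:
--                 chars[i] = '「'  # Ouvrant
--                 in_double_quote = True
--             else:
--                 chars[i] = '」'  # Fermant
--                 in_double_quote = False
--         elif char == "'":
--             if not in_single_quote:
--                 chars[i] = '『'  # Ouvrant simple
--                 in_single_quote = True
--             else:
--                 chars[i] = '』'  # Fermant simple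
--                 in_single_quote = False
--
--     return ''.join(chars)
-- ===== SOURCE B (Python) =====
-- SIMPLE_MAP = {
--     ',': '，',
--     '.': '。',
--     '?': '？',
--     '!': '！',
--     ':': '：',
--     ';': '；',
-- }
--
-- def preserve_chinese_punctuation(text):
--     out = []
--     in_double_quote = False
--     in_single_quote = False
--     for ch in text:
--         if ch == '"':
--             out.append('」' if in_double_quote else '「')
--             in_double_quote = not in_double_quote
--         elif ch == "'":
--             out.append('』' if in_single_quote else '『')
--             in_single_quote = not in_single_quote
--         elif ch == ' ':
--             pass
--         else:
--             out.append(SIMPLE_MAP.get(ch, ch))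
--     return ''.join(out)
-- ===== Notes on version B (the rewrite author's own statement) =====
-- stated objective: simpler
-- what changed: Replaces seven sequential full-string .replace passes plus a separate list-mutating quote pass with one left-to-right scan that maps punctuation, drops spaces and flips the quote booleans in a single traversal.
import Mathlib
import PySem

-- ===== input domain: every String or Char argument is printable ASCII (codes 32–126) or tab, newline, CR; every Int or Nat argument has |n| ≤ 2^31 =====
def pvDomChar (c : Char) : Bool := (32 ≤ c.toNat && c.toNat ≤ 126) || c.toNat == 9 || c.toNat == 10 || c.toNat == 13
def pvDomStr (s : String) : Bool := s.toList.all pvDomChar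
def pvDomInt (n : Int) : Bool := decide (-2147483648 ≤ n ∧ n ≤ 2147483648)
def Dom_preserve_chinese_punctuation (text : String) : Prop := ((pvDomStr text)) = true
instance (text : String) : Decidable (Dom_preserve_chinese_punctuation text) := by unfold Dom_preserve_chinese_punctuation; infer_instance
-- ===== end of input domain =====

-- B replaces A's seven sequential full-string replace passes plus a separate quote pass
-- with one left-to-right scan over the original text (objective: simpler).


-- ===== PORT A =====
-- the dict literal simple_map, as an association list in insertion order
def pcpSimpleMap : List (String × String) :=
  [(",", "，"), (".", "。"), ("?", "？"), ("!", "！"), (":", "："), (";", "；"), (" ", "")]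

-- A's second loop: enumerate + in-place assignment of chars[i]; ported as the
-- structural recursion producing the same final char list with the same two booleans
def pcpQuoteGo (in_double_quote in_single_quote : Bool) : List Char → List Char
  | [] => []
  | c :: t =>
    if c = '"' then
      if !in_double_quote then '「' :: pcpQuoteGo true in_single_quote t
      else '」' :: pcpQuoteGo false in_single_quote t
    else if c = '\'' then
      if !in_single_quote then '『' :: pcpQuoteGo in_double_quote true t
      else '』' :: pcpQuoteGo in_double_quote false t
    else c :: pcpQuoteGo in_double_quote in_single_quote t

def preserve_chinese_punctuation (text : String) : String :=
  let result := pcpSimpleMap.foldl (fun r p => PySem.Str.replace r p.1 p.2) text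
  String.mk (pcpQuoteGo false false result.toList)

-- ===== PORT B =====
def pcpAltMap : PySem.Dict Char Char :=
  PySem.Dict.ofList [(',', '，'), ('.', '。'), ('?', '？'), ('!', '！'), (':', '：'), (';', '；')]

-- B's single scan: emit/flip on quotes, skip spaces, dict lookup with default otherwise
def pcpAltGo (in_double_quote in_single_quote : Bool) : List Char → List Char
  | [] => []
  | ch :: t =>
    if ch = '"' then
      (if in_double_quote then '」' else '「') :: pcpAltGo (!in_double_quote) in_single_quote t
    else if ch = '\'' then
      (if in_single_quote then '』' else '『') :: pcpAltGo in_double_quote (!in_single_quote) t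
    else if ch = ' ' then pcpAltGo in_double_quote in_single_quote t
    else pcpAltMap.getD ch ch :: pcpAltGo in_double_quote in_single_quote t

def preserve_chinese_punctuation_alt (text : String) : String :=
  String.mk (pcpAltGo false false text.toList)

-- ===== PRECONDITION & SPEC =====
def Spec_preserve_chinese_punctuation (text : String) (out : String) : Prop := out = preserve_chinese_punctuation_alt text
instance (text : String) (out : String) : Decidable (Spec_preserve_chinese_punctuation text out) := by unfold Spec_preserve_chinese_punctuation; infer_instance

-- ===== CLAIM (what is proved, stated in full; the proofs are below) =====
def Claim_equal_preserve_chinese_punctuation : Prop := ∀ (text : String), Dom_preserve_chinese_punctuation text → Spec_preserve_chinese_punctuation text (preserve_chinese_punctuation text)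

-- ===== LEMMAS AND PROOFS =====

-- one replace pass, per character
def pcpStep (c : Char) (new : List Char) (x : Char) : List Char := if x = c then new else [x]

-- the per-char effect of the seven replace passes combined
def pcpF (c : Char) : List Char :=
  if c = ',' then ['，'] else if c = '.' then ['。'] else if c = '?' then ['？']
  else if c = '!' then ['！'] else if c = ':' then ['：'] else if c = ';' then ['；']
  else if c = ' ' then [] else [c]

theorem pcp_go_single (c : Char) (new : List Char) :
    ∀ (s : List Char) (fuel : Nat) (acc : List Char), s.length ≤ fuel →
      PySem.Chars.replace.go [c] new fuel s acc = acc.reverse ++ s.flatMap (pcpStep c new) := by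
  intro s
  induction s with
  | nil =>
    intro fuel acc _
    cases fuel <;> simp [PySem.Chars.replace.go]
  | cons x t ih =>
    intro fuel acc h
    cases fuel with
    | zero => simp at h
    | succ fuel =>
      by_cases hx : x = c
      · subst hx
        have hp : List.isPrefixOf [x] (x :: t) = true := by simp [List.isPrefixOf]
        rw [PySem.Chars.replace.go, if_pos hp]
        simp only [List.length_singleton, List.drop_one, List.tail_cons]
        rw [ih fuel (new.reverse ++ acc) (by simpa using Nat.le_of_succ_le_succ h)]
        simp [pcpStep, List.flatMap_cons]
      · have hp : List.isPrefixOf [c] (x :: t) = false := by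
          simp [List.isPrefixOf]
          exact fun h' => absurd h'.symm hx
        rw [PySem.Chars.replace.go, if_neg (by simp [hp])]
        rw [ih fuel (x :: acc) (by simpa using Nat.le_of_succ_le_succ h)]
        simp [pcpStep, List.flatMap_cons, if_neg hx]

theorem pcp_replace_single (c : Char) (new : List Char) (s : List Char) :
    PySem.Chars.replace s [c] new = s.flatMap (pcpStep c new) := by
  simp [PySem.Chars.replace, pcp_go_single c new s s.length [] (le_refl _)]

theorem pcp_replace_str (r : String) (c : Char) (new : String) :
    (PySem.Str.replace r (String.mk [c]) new).toList = r.toList.flatMap (pcpStep c new.toList) := by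
  rw [PySem.Str.toList_replace]
  have h : (String.mk [c]).toList = [c] := Eq.symm (String.ofList_eq.mp rfl)
  rw [h]
  exact pcp_replace_single c new.toList r.toList

-- the seven per-char passes compose to pcpF
theorem pcp_comp (x : Char) :
    ((((((pcpStep ',' ['，'] x).flatMap (pcpStep '.' ['。'])).flatMap (pcpStep '?' ['？'])).flatMap
      (pcpStep '!' ['！'])).flatMap (pcpStep ':' ['：'])).flatMap (pcpStep ';' ['；'])).flatMap
      (pcpStep ' ' []) = pcpF x := by
  by_cases h1 : x = ','
  · subst h1; decide
  by_cases h2 : x = '.'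
  · subst h2; decide
  by_cases h3 : x = '?'
  · subst h3; decide
  by_cases h4 : x = '!'
  · subst h4; decide
  by_cases h5 : x = ':'
  · subst h5; decide
  by_cases h6 : x = ';'
  · subst h6; decide
  by_cases h7 : x = ' '
  · subst h7; decide
  simp [pcpStep, pcpF, h1, h2, h3, h4, h5, h6, h7]

theorem pcp_passes_list : ∀ l : List Char,
    ((((((l.flatMap (pcpStep ',' ['，'])).flatMap (pcpStep '.' ['。'])).flatMap (pcpStep '?' ['？'])).flatMap
      (pcpStep '!' ['！'])).flatMap (pcpStep ':' ['：'])).flatMap (pcpStep ';' ['；'])).flatMap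
      (pcpStep ' ' []) = l.flatMap pcpF := by
  intro l
  induction l with
  | nil => rfl
  | cons x t ih =>
    simp only [List.flatMap_cons, List.flatMap_append, ih, pcp_comp x]

theorem pcp_passes (text : String) :
    (pcpSimpleMap.foldl (fun r p => PySem.Str.replace r p.1 p.2) text).toList
      = text.toList.flatMap pcpF := by
  show (PySem.Str.replace (PySem.Str.replace (PySem.Str.replace (PySem.Str.replace
      (PySem.Str.replace (PySem.Str.replace (PySem.Str.replace text "," "，")
      "." "。") "?" "？") "!" "！") ":" "：") ";" "；") " " "").toList
      = text.toList.flatMap pcpF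
  rw [show ("," : String) = String.mk [','] from rfl, show ("." : String) = String.mk ['.'] from rfl,
      show ("?" : String) = String.mk ['?'] from rfl, show ("!" : String) = String.mk ['!'] from rfl,
      show (":" : String) = String.mk [':'] from rfl, show (";" : String) = String.mk [';'] from rfl,
      show (" " : String) = String.mk [' '] from rfl]
  rw [pcp_replace_str, pcp_replace_str, pcp_replace_str, pcp_replace_str,
      pcp_replace_str, pcp_replace_str, pcp_replace_str]
  exact pcp_passes_list text.toList

theorem pcp_quote_flatMap : ∀ (l : List Char) (db sq : Bool),
    pcpQuoteGo db sq (l.flatMap pcpF) = pcpAltGo db sq l := by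
  intro l
  induction l with
  | nil => intro db sq; rfl
  | cons x t ih =>
    intro db sq
    by_cases h1 : x = ','
    · subst h1
      have hg : pcpAltMap.getD ',' ',' = '，' := by decide
      simp [pcpF, pcpQuoteGo, pcpAltGo, ih, hg]
    by_cases h2 : x = '.'
    · subst h2
      have hg : pcpAltMap.getD '.' '.' = '。' := by decide
      simp [pcpF, pcpQuoteGo, pcpAltGo, ih, hg]
    by_cases h3 : x = '?'
    · subst h3
      have hg : pcpAltMap.getD '?' '?' = '？' := by decide
      simp [pcpF, pcpQuoteGo, pcpAltGo, ih, hg]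
    by_cases h4 : x = '!'
    · subst h4
      have hg : pcpAltMap.getD '!' '!' = '！' := by decide
      simp [pcpF, pcpQuoteGo, pcpAltGo, ih, hg]
    by_cases h5 : x = ':'
    · subst h5
      have hg : pcpAltMap.getD ':' ':' = '：' := by decide
      simp [pcpF, pcpQuoteGo, pcpAltGo, ih, hg]
    by_cases h6 : x = ';'
    · subst h6
      have hg : pcpAltMap.getD ';' ';' = '；' := by decide
      simp [pcpF, pcpQuoteGo, pcpAltGo, ih, hg]
    by_cases h7 : x = ' '
    · subst h7; cases db <;> cases sq <;> simp [pcpF, pcpAltGo, ih]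
    by_cases h8 : x = '"'
    · subst h8; cases db <;> cases sq <;> simp [pcpF, pcpQuoteGo, pcpAltGo, ih]
    by_cases h9 : x = '\''
    · subst h9; cases db <;> cases sq <;> simp [pcpF, pcpQuoteGo, pcpAltGo, ih]
    · have hF : pcpF x = [x] := by simp [pcpF, h1, h2, h3, h4, h5, h6, h7]
      have b1 : (',' == x) = false := beq_eq_false_iff_ne.mpr (Ne.symm h1)
      have b2 : ('.' == x) = false := beq_eq_false_iff_ne.mpr (Ne.symm h2)
      have b3 : ('?' == x) = false := beq_eq_false_iff_ne.mpr (Ne.symm h3)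
      have b4 : ('!' == x) = false := beq_eq_false_iff_ne.mpr (Ne.symm h4)
      have b5 : (':' == x) = false := beq_eq_false_iff_ne.mpr (Ne.symm h5)
      have b6 : (';' == x) = false := beq_eq_false_iff_ne.mpr (Ne.symm h6)
      have hd : pcpAltMap = PySem.Dict.mk [(',', '，'), ('.', '。'), ('?', '？'), ('!', '！'), (':', '：'), (';', '；')] := by decide
      have hget : pcpAltMap.getD x x = x := by
        simp [hd, PySem.Dict.getD, b1, b2, b3, b4, b5, b6, PySem.Dict.get?]
      simp only [List.flatMap_cons, hF, List.singleton_append]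
      rw [pcpQuoteGo, pcpAltGo]
      simp [h7, h8, h9, ih, hget]

-- ===== VERDICT (by name: the statement is the Claim_ definition above) =====
theorem preserve_chinese_punctuation_spec : Claim_equal_preserve_chinese_punctuation := by
  intro text _
  show String.mk (pcpQuoteGo false false
      (pcpSimpleMap.foldl (fun r p => PySem.Str.replace r p.1 p.2) text).toList)
    = String.mk (pcpAltGo false false text.toList)
  rw [pcp_passes, pcp_quote_flatMap]
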